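-- pv_equiv track=rewrite | github.com/douglasryanadams/advent_of_code | 2020_07.py | count_unique_bags
-- ===== SOURCE A (Python) =====
-- from typing import Set, Dict, List
--
-- def count_unique_bags(child_bags: Dict[str, Set[str]], bags_counted: Set[str], color: str):
--     if color not in child_bags:
--         return 0
--     parent_colors = child_bags[color]
--     count = 0
--     for pc in parent_colors:
--         if pc not in bags_counted:
--             count += 1
--             bags_counted.add(pc)
--             count += count_unique_bags(child_bags, bags_counted, pc)
--     return count
-- ===== SOURCE B (Python) =====
-- def count_unique_bags(child_bags, bags_counted, color):
--     # Iterative worklist traversal with an explicit stack instead of recursion.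
--     # Mutates bags_counted exactly like the original (adds every newly counted color).
--     count = 0
--     stack = [color]
--     while stack:
--         node = stack.pop()
--         for pc in child_bags.get(node, ()):
--             if pc not in bags_counted:
--                 count += 1
--                 bags_counted.add(pc)
--                 stack.append(pc)
--     return count
-- ===== Notes on version B (the rewrite author's own statement) =====
-- stated objective: alternative
-- what changed: Replaces the recursive DFS (recursion mutating the shared visited set) by an iterative traversal with an explicit stack and a default-empty dict lookup; the count is order-independent, so both return the number of newly reachable ancestor colors.
import Mathlib
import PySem

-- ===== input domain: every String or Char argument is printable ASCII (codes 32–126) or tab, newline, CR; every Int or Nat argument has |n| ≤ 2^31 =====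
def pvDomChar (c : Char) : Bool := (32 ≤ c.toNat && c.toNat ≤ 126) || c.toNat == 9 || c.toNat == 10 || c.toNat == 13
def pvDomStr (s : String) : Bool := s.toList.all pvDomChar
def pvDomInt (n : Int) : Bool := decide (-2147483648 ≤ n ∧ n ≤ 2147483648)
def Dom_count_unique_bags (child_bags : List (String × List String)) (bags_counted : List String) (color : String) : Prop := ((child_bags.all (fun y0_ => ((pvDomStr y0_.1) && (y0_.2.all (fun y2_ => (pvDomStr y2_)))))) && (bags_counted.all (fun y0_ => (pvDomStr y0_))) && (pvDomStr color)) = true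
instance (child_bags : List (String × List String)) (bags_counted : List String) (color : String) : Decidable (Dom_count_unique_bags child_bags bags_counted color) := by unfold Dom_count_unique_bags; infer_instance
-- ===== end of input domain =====

-- B replaces A's recursive DFS by an iterative explicit-stack traversal (same return value;
-- both Pythons mutate bags_counted, ending with the same final set — the equivalence proved here
-- is about the return value).

-- ===== PORT A =====

def pvSucc (cb : List (String × List String)) (u : String) : List String :=
  (PySem.Dict.get? (PySem.Dict.mk cb) u).getD []

def pvAllC (cb : List (String × List String)) : List String :=
  PySem.List.dedup ((cb.map Prod.snd).flatten)

def pvMu (cb : List (String × List String)) (bc : List String) : Nat :=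
  ((pvAllC cb).filter (fun c => !bc.contains c)).length

theorem pvMu_le_of_subset (cb : List (String × List String)) {b1 b2 : List String}
    (h : ∀ x ∈ b1, x ∈ b2) : pvMu cb b2 ≤ pvMu cb b1 := by
  apply List.Sublist.length_le
  apply List.monotone_filter_right
  intro c hc
  simp only [Bool.not_eq_eq_eq_not, Bool.not_true, List.contains_eq_mem,
    decide_eq_false_iff_not] at *
  exact fun hm => hc (h c hm)

theorem pvMu_lt_add (cb : List (String × List String)) {bc : List String} {pc : String}
    (hm : pc ∈ pvAllC cb) (hn : pc ∉ bc) : pvMu cb (PySem.Set.add bc pc) < pvMu cb bc := by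
  have hadd : PySem.Set.add bc pc = bc ++ [pc] := PySem.Set.add_of_not_mem hn
  rw [hadd]
  unfold pvMu
  have hsl : ((pvAllC cb).filter (fun c => !(bc ++ [pc]).contains c)).Sublist
      ((pvAllC cb).filter (fun c => !bc.contains c)) := by
    apply List.monotone_filter_right
    intro c hc
    simp only [Bool.not_eq_eq_eq_not, Bool.not_true, List.contains_eq_mem, List.mem_append,
      List.mem_singleton, decide_eq_false_iff_not, not_or] at *
    exact hc.1
  rcases Nat.lt_or_ge ((pvAllC cb).filter (fun c => !(bc ++ [pc]).contains c)).length
      ((pvAllC cb).filter (fun c => !bc.contains c)).length with h | h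
  · exact h
  · exfalso
    have heq := hsl.eq_of_length (Nat.le_antisymm (hsl.length_le) h)
    have h1 : pc ∈ (pvAllC cb).filter (fun c => !bc.contains c) := by
      simp only [List.mem_filter, Bool.not_eq_eq_eq_not, Bool.not_true, List.contains_eq_mem,
        decide_eq_false_iff_not]
      exact ⟨hm, hn⟩
    rw [← heq] at h1
    have h2 := (List.mem_filter.mp h1).2
    simp at h2

theorem pvGet_subset_allC (cb : List (String × List String)) (u : String) :
    ∀ p ∈ pvSucc cb u, p ∈ pvAllC cb := by
  intro p hp
  unfold pvSucc PySem.Dict.get? at hp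
  unfold pvAllC
  rw [PySem.List.mem_dedup]
  cases hfind : List.find? (fun q => q.1 == u) (PySem.Dict.mk cb).items with
  | none => rw [hfind] at hp; simp at hp
  | some q =>
    rw [hfind] at hp
    simp only [Option.map_some, Option.getD_some] at hp
    have hqmem : q ∈ cb := List.mem_of_find?_eq_some hfind
    rw [List.mem_flatten]
    exact ⟨q.2, by rw [List.mem_map]; exact ⟨q, hqmem, rfl⟩, hp⟩

-- ===== PORT A =====
mutual
def pvCountA (cb : List (String × List String)) (bc : List String) (color : String) :
    {r : Int × List String // ∀ x ∈ bc, x ∈ r.2} :=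
  match h : PySem.Dict.get? (PySem.Dict.mk cb) color with
  | none => ⟨(0, bc), fun _ hx => hx⟩
  | some ps =>
      pvLoopA cb bc ps 0 (by
        intro p hp
        apply pvGet_subset_allC cb color
        unfold pvSucc
        rw [h]; exact hp)
termination_by (pvMu cb bc, 1, 0)
decreasing_by
  exact Prod.Lex.right _ (Prod.Lex.left _ _ (by omega))

def pvLoopA (cb : List (String × List String)) (bc : List String) (ps : List String)
    (count : Int) (hps : ∀ p ∈ ps, p ∈ pvAllC cb) :
    {r : Int × List String // ∀ x ∈ bc, x ∈ r.2} :=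
  match ps with
  | [] => ⟨(count, bc), fun _ hx => hx⟩
  | pc :: rest =>
      if hmem : bc.contains pc then
        pvLoopA cb bc rest count (fun p hp => hps p (List.mem_cons_of_mem _ hp))
      else
        let r1 := pvCountA cb (PySem.Set.add bc pc) pc
        let r2 := pvLoopA cb r1.val.2 rest (count + 1 + r1.val.1)
          (fun p hp => hps p (List.mem_cons_of_mem _ hp))
        ⟨r2.val, fun x hx => r2.property x (r1.property x (by
          rw [PySem.Set.add_of_not_mem (by simpa using hmem)]
          exact List.mem_append_left _ hx))⟩
termination_by (pvMu cb bc, 0, ps.length)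
decreasing_by
  · exact Prod.Lex.right _ (Prod.Lex.right _ (by simp))
  · exact Prod.Lex.left _ _ (pvMu_lt_add cb (hps pc (List.mem_cons_self)) (by simpa using hmem))
  · apply Prod.Lex.left
    calc pvMu cb r1.val.2 ≤ pvMu cb (PySem.Set.add bc pc) := pvMu_le_of_subset cb r1.property
    _ < pvMu cb bc := pvMu_lt_add cb (hps pc (List.mem_cons_self)) (by simpa using hmem)
end

def count_unique_bags (child_bags : List (String × List String)) (bags_counted : List String)
    (color : String) : Int :=
  (pvCountA child_bags bags_counted color).val.1


-- ===== PORT B =====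
def pvFoldB (cb : List (String × List String)) (bc stack : List String) (count : Int)
    (ps : List String) (hps : ∀ p ∈ ps, p ∈ pvAllC cb) :
    {r : Int × List String × List String //
      pvMu cb r.2.1 + r.2.2.length ≤ pvMu cb bc + stack.length} :=
  match ps with
  | [] => ⟨(count, bc, stack), le_refl _⟩
  | pc :: rest =>
      if hmem : bc.contains pc then
        pvFoldB cb bc stack count rest (fun p hp => hps p (List.mem_cons_of_mem _ hp))
      else
        let r := pvFoldB cb (PySem.Set.add bc pc) (pc :: stack) (count + 1) rest
          (fun p hp => hps p (List.mem_cons_of_mem _ hp))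
        ⟨r.val, by
          have h1 := r.property
          have h2 := pvMu_lt_add cb (hps pc (List.mem_cons_self)) (by simpa using hmem)
          simp only [List.length_cons] at h1
          omega⟩

def pvLoopB (cb : List (String × List String)) (bc stack : List String) (count : Int) : Int :=
  match stack with
  | [] => count
  | node :: rest =>
      let r := pvFoldB cb bc rest count (pvSucc cb node) (pvGet_subset_allC cb node)
      pvLoopB cb r.val.2.1 r.val.2.2 r.val.1
termination_by pvMu cb bc + stack.length
decreasing_by
  have h1 := (pvFoldB cb bc rest count (pvSucc cb node) (pvGet_subset_allC cb node)).property
  simp only [List.length_cons]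
  omega

def count_unique_bags_alt (child_bags : List (String × List String)) (bags_counted : List String)
    (color : String) : Int :=
  pvLoopB child_bags bags_counted [color] 0


-- ===== PRECONDITION & SPEC =====
def Spec_count_unique_bags (child_bags : List (String × List String)) (bags_counted : List String) (color : String) (out : Int) : Prop := out = count_unique_bags_alt child_bags bags_counted color
instance (child_bags : List (String × List String)) (bags_counted : List String) (color : String) (out : Int) : Decidable (Spec_count_unique_bags child_bags bags_counted color out) := by unfold Spec_count_unique_bags; infer_instance

-- ===== CLAIM (what is proved, stated in full; the proofs are below) =====
def Claim_equal_count_unique_bags : Prop := ∀ (child_bags : List (String × List String)) (bags_counted : List String) (color : String), Dom_count_unique_bags child_bags bags_counted color → Spec_count_unique_bags child_bags bags_counted color (count_unique_bags child_bags bags_counted color)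

-- ===== LEMMAS AND PROOFS =====
-- ===== reachability =====
inductive PvReach (cb : List (String × List String)) (V0 : List String) (c0 : String) : String → Prop
  | base (v : String) : v ∈ pvSucc cb c0 → v ∉ V0 → PvReach cb V0 c0 v
  | step (u v : String) : PvReach cb V0 c0 u → v ∈ pvSucc cb u → v ∉ V0 → PvReach cb V0 c0 v

theorem pvReach_not_mem {cb : List (String × List String)} {V0 : List String} {c0 x : String}
    (h : PvReach cb V0 c0 x) : x ∉ V0 := by cases h <;> assumption

theorem pvReach_mono {cb : List (String × List String)} {V V' : List String} {c x : String}
    (hsub : ∀ y ∈ V, y ∈ V') (h : PvReach cb V' c x) : PvReach cb V c x := by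
  induction h with
  | base v hv hn => exact .base v hv (fun hx => hn (hsub _ hx))
  | step u v _ hv hn ih => exact .step u v ih hv (fun hx => hn (hsub _ hx))

theorem pvReach_trans {cb : List (String × List String)} {V : List String} {c u x : String}
    (h1 : PvReach cb V c u) (h2 : PvReach cb V u x) : PvReach cb V c x := by
  induction h2 with
  | base v hv hn => exact .step u v h1 hv hn
  | step w v _ hv hn ih => exact .step w v ih hv hn

-- ===== A-side spec =====
def pvCAS (cb : List (String × List String)) (bc : List String) (c : String) : Prop :=
  ∃ ad : List String,
    (pvCountA cb bc c).val.2 = bc ++ ad ∧ ad.Nodup ∧ (∀ x ∈ ad, x ∉ bc) ∧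
    (pvCountA cb bc c).val.1 = (ad.length : Int) ∧
    (∀ x ∈ ad, PvReach cb bc c x) ∧
    (∀ p ∈ pvSucc cb c, p ∈ bc ++ ad) ∧
    (∀ w ∈ ad, ∀ p ∈ pvSucc cb w, p ∈ bc ++ ad)

def pvLAS (cb : List (String × List String)) (bc : List String) (ps : List String) (count : Int)
    (hps : ∀ p ∈ ps, p ∈ pvAllC cb) : Prop :=
  ∃ ad : List String,
    (pvLoopA cb bc ps count hps).val.2 = bc ++ ad ∧ ad.Nodup ∧ (∀ x ∈ ad, x ∉ bc) ∧
    (pvLoopA cb bc ps count hps).val.1 = count + (ad.length : Int) ∧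
    (∀ x ∈ ad, ∃ pc ∈ ps, x = pc ∨ (pc ∉ bc ∧ PvReach cb bc pc x)) ∧
    (∀ p ∈ ps, p ∈ bc ++ ad) ∧
    (∀ w ∈ ad, ∀ p ∈ pvSucc cb w, p ∈ bc ++ ad)

theorem pvLA (n : Nat) (IH : ∀ cb bc c, pvMu cb bc < n → pvCAS cb bc c) :
    ∀ (ps : List String) (cb : List (String × List String)) (bc : List String) (count : Int)
      (hps : ∀ p ∈ ps, p ∈ pvAllC cb), pvMu cb bc ≤ n → pvLAS cb bc ps count hps := by
  intro ps
  induction ps with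
  | nil =>
      intro cb bc count hps hn
      refine ⟨[], ?_, ?_, ?_, ?_, ?_, ?_, ?_⟩ <;> simp [pvLoopA]
  | cons pc rest ihp =>
      intro cb bc count hps hn
      have H' : ∀ p ∈ rest, p ∈ pvAllC cb := fun p hp => hps p (List.mem_cons_of_mem _ hp)
      by_cases hmem : bc.contains pc = true
      · -- pc already counted: skip
        have heq : (pvLoopA cb bc (pc :: rest) count hps).val
            = (pvLoopA cb bc rest count H').val := by
          rw [pvLoopA, dif_pos hmem]
        have hpcbc : pc ∈ bc := by simpa using hmem
        obtain ⟨ad, h1, h2, h3, h4, h5, h6, h7⟩ := ihp cb bc count H' hn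
        refine ⟨ad, by rw [heq]; exact h1, h2, h3, by rw [heq]; exact h4, ?_, ?_, h7⟩
        · intro x hx
          obtain ⟨pc', hpc', hcase⟩ := h5 x hx
          exact ⟨pc', List.mem_cons_of_mem _ hpc', hcase⟩
        · intro p hp
          rcases List.mem_cons.mp hp with rfl | hp'
          · exact List.mem_append_left _ hpcbc
          · exact h6 p hp'
      · -- new color pc
        have hpcbc : pc ∉ bc := by simpa using hmem
        have hadd : PySem.Set.add bc pc = bc ++ [pc] := PySem.Set.add_of_not_mem hpcbc
        have hmu1 : pvMu cb (PySem.Set.add bc pc) < n :=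
          Nat.lt_of_lt_of_le (pvMu_lt_add cb (hps pc List.mem_cons_self) hpcbc) hn
        obtain ⟨ad1, k1, k2, k3, k4, k5, k6, k7⟩ := IH cb (PySem.Set.add bc pc) pc hmu1
        have hmu2 : pvMu cb (pvCountA cb (PySem.Set.add bc pc) pc).val.2 ≤ n :=
          le_of_lt (Nat.lt_of_le_of_lt
            (pvMu_le_of_subset cb (pvCountA cb (PySem.Set.add bc pc) pc).property) hmu1)
        obtain ⟨ad2, m1, m2, m3, m4, m5, m6, m7⟩ :=
          ihp cb (pvCountA cb (PySem.Set.add bc pc) pc).val.2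
            (count + 1 + (pvCountA cb (PySem.Set.add bc pc) pc).val.1) H' hmu2
        have heq : (pvLoopA cb bc (pc :: rest) count hps).val
            = (pvLoopA cb (pvCountA cb (PySem.Set.add bc pc) pc).val.2 rest
                (count + 1 + (pvCountA cb (PySem.Set.add bc pc) pc).val.1) H').val := by
          rw [pvLoopA, dif_neg hmem]
        have hA2 : (pvCountA cb (PySem.Set.add bc pc) pc).val.2 = bc ++ (pc :: ad1) := by
          rw [k1, hadd]; simp
        refine ⟨pc :: (ad1 ++ ad2), ?_, ?_, ?_, ?_, ?_, ?_, ?_⟩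
        · rw [heq, m1, hA2]; simp
        · -- Nodup
          have hpc1 : pc ∉ ad1 := fun hx => k3 pc hx (by rw [hadd]; simp)
          have hpc2 : pc ∉ ad2 := fun hx => m3 pc hx (by rw [hA2]; simp)
          have hdj : ∀ x ∈ ad1, x ∉ ad2 := by
            intro x hx1 hx2
            exact m3 x hx2 (by rw [hA2]; simp [hx1])
          simp only [List.nodup_cons, List.nodup_append, List.mem_append]
          exact ⟨by tauto, k2, m2, fun a ha b hb hab => hdj a ha (hab ▸ hb)⟩
        · -- disjoint from bc
          intro x hx
          rcases List.mem_cons.mp hx with rfl | hx'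
          · exact hpcbc
          · rcases List.mem_append.mp hx' with hx1 | hx2
            · exact fun hb => k3 x hx1 (by rw [hadd]; exact List.mem_append_left _ hb)
            · exact fun hb => m3 x hx2 (by rw [hA2]; exact List.mem_append_left _ hb)
        · -- count
          rw [heq, m4, k4]
          simp only [List.length_cons, List.length_append]
          push_cast
          ring
        · -- soundness
          intro x hx
          have hsub1 : ∀ y ∈ bc, y ∈ PySem.Set.add bc pc := by
            rw [hadd]; exact fun y hy => List.mem_append_left _ hy
          rcases List.mem_cons.mp hx with rfl | hx'
          · exact ⟨x, List.mem_cons_self, Or.inl rfl⟩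
          · rcases List.mem_append.mp hx' with hx1 | hx2
            · exact ⟨pc, List.mem_cons_self,
                Or.inr ⟨hpcbc, pvReach_mono hsub1 (k5 x hx1)⟩⟩
            · obtain ⟨pc', hpc', hcase⟩ := m5 x hx2
              refine ⟨pc', List.mem_cons_of_mem _ hpc', ?_⟩
              rcases hcase with rfl | ⟨hnb, hr⟩
              · exact Or.inl rfl
              · refine Or.inr ⟨fun hb => hnb (by rw [hA2]; exact List.mem_append_left _ hb), ?_⟩
                exact pvReach_mono (fun y hy => by rw [hA2]; exact List.mem_append_left _ hy) hr
        · -- every processed parent ends up in the result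
          intro p hp
          rcases List.mem_cons.mp hp with rfl | hp'
          · simp
          · have := m6 p hp'
            rw [hA2] at this
            simpa using (by simpa using this : p ∈ bc ++ pc :: ad1 ++ ad2)
        · -- closedness of every added color
          intro w hw p hp
          have hre : ∀ q, q ∈ (PySem.Set.add bc pc) ++ ad1 → q ∈ bc ++ (pc :: (ad1 ++ ad2)):= by
            intro q hq
            rw [hadd] at hq
            simp only [List.mem_append, List.mem_cons] at hq ⊢
            tauto
          rcases List.mem_cons.mp hw with rfl | hw'
          · exact hre p (k6 p hp)
          · rcases List.mem_append.mp hw' with hw1 | hw2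
            · exact hre p (k7 w hw1 p hp)
            · have := m7 w hw2 p hp
              rw [hA2] at this
              simp only [List.mem_append, List.mem_cons] at this ⊢
              tauto

theorem pvCA : ∀ (n : Nat) (cb : List (String × List String)) (bc : List String) (c : String),
    pvMu cb bc = n → pvCAS cb bc c := by
  intro n
  induction n using Nat.strong_induction_on with
  | _ n IH =>
    intro cb bc c hn
    have IH' : ∀ cb' bc' c', pvMu cb' bc' < n → pvCAS cb' bc' c' := by
      intro cb' bc' c' h
      exact IH _ h cb' bc' c' rfl
    rw [pvCAS, pvCountA]
    split
    · -- color not a key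
      rename_i h
      have hsucc : pvSucc cb c = [] := by unfold pvSucc; rw [h]; rfl
      exact ⟨[], by simp, by simp, by simp, by simp, by simp, by simp [hsucc], by simp⟩
    · rename_i ps h
      have hsucc : pvSucc cb c = ps := by unfold pvSucc; rw [h]; rfl
      obtain ⟨ad, h1, h2, h3, h4, h5, h6, h7⟩ :=
        pvLA n IH' ps cb bc 0
          (by intro p hp; apply pvGet_subset_allC cb c; rw [hsucc]; exact hp)
          (le_of_eq hn)
      refine ⟨ad, h1, h2, h3, by rw [h4]; ring, ?_, by rw [hsucc]; exact h6, h7⟩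
      intro x hx
      obtain ⟨pc, hpc, hcase⟩ := h5 x hx
      rcases hcase with rfl | ⟨hnb, hr⟩
      · exact PvReach.base x (by rw [hsucc]; exact hpc) (h3 x hx)
      · exact pvReach_trans (PvReach.base pc (by rw [hsucc]; exact hpc) hnb) hr

theorem pvA_char (cb : List (String × List String)) (bc : List String) (c : String) :
    ∃ ad : List String, ad.Nodup ∧ (pvCountA cb bc c).val.1 = (ad.length : Int) ∧
      (∀ x, x ∈ ad ↔ PvReach cb bc c x) := by
  obtain ⟨ad, h1, h2, h3, h4, h5, h6, h7⟩ := pvCA (pvMu cb bc) cb bc c rfl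
  refine ⟨ad, h2, h4, fun x => ⟨h5 x, fun hr => ?_⟩⟩
  have key : ∀ y, PvReach cb bc c y → y ∈ bc ++ ad := by
    intro y hy
    induction hy with
    | base v hv _ => exact h6 v hv
    | step u v hu hv _ ihu =>
        have hu' : u ∈ ad := by
          rcases List.mem_append.mp ihu with h | h
          · exact absurd h (pvReach_not_mem hu)
          · exact h
        exact h7 u hu' v hv
  rcases List.mem_append.mp (key x hr) with h | h
  · exact absurd h (pvReach_not_mem hr)
  · exact h

theorem pvFoldB_spec (cb : List (String × List String)) (V0 : List String) (c0 : String) :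
    ∀ (ps : List String) (hps : ∀ p ∈ ps, p ∈ pvAllC cb) (bc ad stack : List String)
      (count : Int),
    bc = V0 ++ ad → ad.Nodup → (∀ x ∈ ad, x ∉ V0) → count = (ad.length : Int) →
    (∀ s ∈ stack, s = c0 ∨ s ∈ ad) →
    (∀ x ∈ ad, PvReach cb V0 c0 x) →
    (∀ p ∈ ps, p ∉ V0 → PvReach cb V0 c0 p) →
    ∃ ad' : List String,
      (pvFoldB cb bc stack count ps hps).val.2.1 = V0 ++ ad' ∧
      ad'.Nodup ∧ (∀ x ∈ ad', x ∉ V0) ∧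
      (pvFoldB cb bc stack count ps hps).val.1 = (ad'.length : Int) ∧
      (∀ x ∈ ad, x ∈ ad') ∧
      (∀ s ∈ (pvFoldB cb bc stack count ps hps).val.2.2, s = c0 ∨ s ∈ ad') ∧
      (∀ x ∈ ad', PvReach cb V0 c0 x) ∧
      (∀ p ∈ ps, p ∈ V0 ++ ad') ∧
      (∀ w ∈ ad', w ∉ ad → w ∈ (pvFoldB cb bc stack count ps hps).val.2.2) ∧
      (∀ s ∈ stack, s ∈ (pvFoldB cb bc stack count ps hps).val.2.2) := by
  intro ps
  induction ps with
  | nil =>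
      intro hps bc ad stack count hbc hnd hdisj hcount hstack hsound hnode
      exact ⟨ad, by simp [pvFoldB, hbc], hnd, hdisj, by simp [pvFoldB, hcount], fun x hx => hx,
        by simp [pvFoldB]; exact hstack, hsound, by simp, fun w _ hw => absurd (by assumption) hw,
        by simp [pvFoldB]⟩
  | cons pc rest ihp =>
      intro hps bc ad stack count hbc hnd hdisj hcount hstack hsound hnode
      have H' : ∀ p ∈ rest, p ∈ pvAllC cb := fun p hp => hps p (List.mem_cons_of_mem _ hp)
      by_cases hmem : bc.contains pc = true
      · have heq : (pvFoldB cb bc stack count (pc :: rest) hps).val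
            = (pvFoldB cb bc stack count rest H').val := by
          rw [pvFoldB, dif_pos hmem]
        obtain ⟨ad', f1, f2, f3, f4, f5, f6, f7, f8, f9, f10⟩ :=
          ihp H' bc ad stack count hbc hnd hdisj hcount hstack hsound
            (fun p hp => hnode p (List.mem_cons_of_mem _ hp))
        rw [heq]
        refine ⟨ad', f1, f2, f3, f4, f5, f6, f7, ?_, f9, f10⟩
        intro p hp
        rcases List.mem_cons.mp hp with rfl | hp'
        · have : p ∈ bc := by simpa using hmem
          rw [hbc] at this
          rcases List.mem_append.mp this with h | h
          · exact List.mem_append_left _ h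
          · exact List.mem_append_right _ (f5 p h)
        · exact f8 p hp'
      · have hpcbc : pc ∉ bc := by simpa using hmem
        have hadd : PySem.Set.add bc pc = bc ++ [pc] := PySem.Set.add_of_not_mem hpcbc
        have hpcV0 : pc ∉ V0 := fun h => hpcbc (by rw [hbc]; exact List.mem_append_left _ h)
        have hpcad : pc ∉ ad := fun h => hpcbc (by rw [hbc]; exact List.mem_append_right _ h)
        have hbc1 : PySem.Set.add bc pc = V0 ++ (ad ++ [pc]) := by
          rw [hadd, hbc]; simp
        have heq : (pvFoldB cb bc stack count (pc :: rest) hps).val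
            = (pvFoldB cb (PySem.Set.add bc pc) (pc :: stack) (count + 1) rest H').val := by
          rw [pvFoldB, dif_neg hmem]
        obtain ⟨ad', f1, f2, f3, f4, f5, f6, f7, f8, f9, f10⟩ :=
          ihp H' (PySem.Set.add bc pc) (ad ++ [pc]) (pc :: stack) (count + 1) hbc1
            (by simp only [List.nodup_append, List.nodup_singleton]; exact ⟨hnd, by simp, fun a ha => by simp; exact fun he => hpcad (he ▸ ha)⟩)
            (by intro x hx
                rcases List.mem_append.mp hx with h | h
                · exact hdisj x h
                · rw [List.mem_singleton] at h; subst h; exact hpcV0)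
            (by rw [hcount]; simp)
            (by intro s hs
                rcases List.mem_cons.mp hs with rfl | hs'
                · exact Or.inr (by simp)
                · rcases hstack s hs' with h | h
                  · exact Or.inl h
                  · exact Or.inr (List.mem_append_left _ h))
            (by intro x hx
                rcases List.mem_append.mp hx with h | h
                · exact hsound x h
                · rw [List.mem_singleton] at h; subst h
                  exact hnode x List.mem_cons_self hpcV0)
            (fun p hp => hnode p (List.mem_cons_of_mem _ hp))
        rw [heq]
        have had' : ∀ x ∈ ad, x ∈ ad' := fun x hx => f5 x (List.mem_append_left _ hx)
        refine ⟨ad', f1, f2, f3, f4, had', f6, f7, ?_, ?_, ?_⟩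
        · intro p hp
          rcases List.mem_cons.mp hp with rfl | hp'
          · exact List.mem_append_right _ (f5 p (by simp))
          · exact f8 p hp'
        · intro w hw hwad
          by_cases hwpc : w = pc
          · subst hwpc
            exact f10 w List.mem_cons_self
          · exact f9 w hw (by
              intro hcon
              rcases List.mem_append.mp hcon with h | h
              · exact hwad h
              · rw [List.mem_singleton] at h; exact hwpc h)
        · exact fun s hs => f10 s (List.mem_cons_of_mem _ hs)

theorem pvLoopB_spec :
    ∀ (n : Nat) (cb : List (String × List String)) (V0 : List String) (c0 : String)
      (bc stack : List String) (count : Int) (ad : List String),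
    pvMu cb bc + stack.length ≤ n →
    bc = V0 ++ ad → ad.Nodup → (∀ x ∈ ad, x ∉ V0) → count = (ad.length : Int) →
    (∀ s ∈ stack, s = c0 ∨ s ∈ ad) →
    (∀ x ∈ ad, PvReach cb V0 c0 x) →
    (∀ w, (w = c0 ∨ w ∈ ad) → w ∈ stack ∨ (∀ p ∈ pvSucc cb w, p ∈ bc)) →
    ∃ adF : List String, pvLoopB cb bc stack count = (adF.length : Int) ∧ adF.Nodup ∧
      (∀ x, x ∈ adF ↔ PvReach cb V0 c0 x) := by
  intro n
  induction n using Nat.strong_induction_on with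
  | _ n IH =>
    intro cb V0 c0 bc stack count ad hmeas hbc hnd hdisj hcount hstack hsound hclosed
    match stack with
    | [] =>
        refine ⟨ad, by rw [pvLoopB, hcount], hnd, fun x => ⟨hsound x, fun hr => ?_⟩⟩
        have key : ∀ y, PvReach cb V0 c0 y → y ∈ V0 ++ ad := by
          intro y hy
          induction hy with
          | base v hv hn =>
              rcases hclosed c0 (Or.inl rfl) with h | h
              · simp at h
              · rw [← hbc]; exact h v hv
          | step u v hu hv hn ihu =>
              have hu' : u ∈ ad := by
                rcases List.mem_append.mp ihu with h | h
                · exact absurd h (pvReach_not_mem hu)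
                · exact h
              rcases hclosed u (Or.inr hu') with h | h
              · simp at h
              · rw [← hbc]; exact h v hv
        rcases List.mem_append.mp (key x hr) with h | h
        · exact absurd h (pvReach_not_mem hr)
        · exact h
    | node :: rest =>
        have hnode : node = c0 ∨ node ∈ ad := hstack node List.mem_cons_self
        have hnodesnd : ∀ p ∈ pvSucc cb node, p ∉ V0 → PvReach cb V0 c0 p := by
          intro p hp hnV0
          rcases hnode with rfl | hin
          · exact PvReach.base p hp hnV0
          · exact PvReach.step node p (hsound node hin) hp hnV0
        obtain ⟨ad', f1, f2, f3, f4, f5, f6, f7, f8, f9, f10⟩ :=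
          pvFoldB_spec cb V0 c0 (pvSucc cb node) (pvGet_subset_allC cb node) bc ad rest count
            hbc hnd hdisj hcount (fun s hs => hstack s (List.mem_cons_of_mem _ hs)) hsound
            hnodesnd
        have heq : pvLoopB cb bc (node :: rest) count
            = pvLoopB cb (pvFoldB cb bc rest count (pvSucc cb node)
                (pvGet_subset_allC cb node)).val.2.1
              (pvFoldB cb bc rest count (pvSucc cb node) (pvGet_subset_allC cb node)).val.2.2
              (pvFoldB cb bc rest count (pvSucc cb node) (pvGet_subset_allC cb node)).val.1 := by
          rw [pvLoopB]
        have hmeas' : pvMu cb (pvFoldB cb bc rest count (pvSucc cb node)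
              (pvGet_subset_allC cb node)).val.2.1
            + (pvFoldB cb bc rest count (pvSucc cb node)
              (pvGet_subset_allC cb node)).val.2.2.length < n := by
          have hp := (pvFoldB cb bc rest count (pvSucc cb node)
            (pvGet_subset_allC cb node)).property
          simp only [List.length_cons] at hmeas
          omega
        rw [heq]
        apply IH _ hmeas' cb V0 c0 _ _ _ ad' (le_refl _) f1 f2 f3 f4 f6 f7
        intro w hw
        classical
        rcases hw with rfl | hwad'
        · rcases hclosed w (Or.inl rfl) with h | h
          · rcases List.mem_cons.mp h with rfl | h'
            · right; rw [f1]; exact f8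
            · left; exact f10 w h'
          · right
            intro p hp
            rw [f1]
            have := h p hp
            rw [hbc] at this
            rcases List.mem_append.mp this with h' | h'
            · exact List.mem_append_left _ h'
            · exact List.mem_append_right _ (f5 p h')
        · by_cases hwad : w ∈ ad
          · rcases hclosed w (Or.inr hwad) with h | h
            · rcases List.mem_cons.mp h with rfl | h'
              · right; rw [f1]; exact f8
              · left; exact f10 w h'
            · right
              intro p hp
              rw [f1]
              have := h p hp
              rw [hbc] at this
              rcases List.mem_append.mp this with h' | h'
              · exact List.mem_append_left _ h'
              · exact List.mem_append_right _ (f5 p h')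
          · left; exact f9 w hwad' hwad

theorem pvFinal (cb : List (String × List String)) (bc : List String) (c : String) :
    count_unique_bags cb bc c = count_unique_bags_alt cb bc c := by
  obtain ⟨adA, hndA, hcA, hmA⟩ := pvA_char cb bc c
  obtain ⟨adF, hF, hndF, hmF⟩ :=
    pvLoopB_spec (pvMu cb bc + 1) cb bc c bc [c] 0 [] (by simp) (by simp) (by simp)
      (by simp) (by simp) (by intro s hs; left; simpa using hs) (by simp)
      (by
        intro w hw
        rcases hw with rfl | h
        · exact Or.inl List.mem_cons_self
        · simp at h)
  have hperm : adA.Perm adF :=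
    (List.perm_ext_iff_of_nodup hndA hndF).2 (fun a => (hmA a).trans (hmF a).symm)
  unfold count_unique_bags count_unique_bags_alt
  rw [hcA, hF, hperm.length_eq]

-- ===== VERDICT (by name: the statement is the Claim_ definition above) =====
theorem count_unique_bags_spec : Claim_equal_count_unique_bags := by
  intro child_bags bags_counted color _
  unfold Spec_count_unique_bags
  exact pvFinal child_bags bags_counted color
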